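-- pv_equiv track=rewrite | github.com/omaygah69/cluster-memo | sgcluster.py | find_common_words
-- ===== SOURCE A (Python) =====
-- from collections import Counter
--
-- def find_common_words(documents, min_occurrences=2):
--     """Find words that appear in all documents of a group."""
--     if not documents:
--         return []
--
--     # Collect all tokens from all documents
--     all_tokens = [token for doc in documents for token in doc.get("tokens", [])]
--     token_counts = Counter(all_tokens)
--
--     # Find words that appear at least min_occurrences times
--     common_words = [
--         word for word, count in token_counts.items()
--         if count >= min_occurrences
--     ]
--
--     return sorted(common_words)
-- ===== SOURCE B (Python) =====
-- def find_common_words(documents, min_occurrences=2):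
--     """Find words that appear in all documents of a group."""
--     # Sort all tokens once; scan consecutive runs, emitting each word whose
--     # run length reaches min_occurrences.  Output is already sorted.
--     tokens = sorted(t for doc in documents for t in doc.get("tokens", []))
--     result = []
--     i = 0
--     n = len(tokens)
--     while i < n:
--         j = i + 1
--         while j < n and tokens[j] == tokens[i]:
--             j += 1
--         if j - i >= min_occurrences:
--             result.append(tokens[i])
--         i = j
--     return result
-- ===== Notes on version B (the rewrite author's own statement) =====
-- stated objective: alternative
-- what changed: Replaces Counter-based hashing plus a final sort of the qualifying keys by a single sort of the flattened token list followed by a run-length scan of consecutive equal tokens, emitting qualifying words directly in sorted order (no Counter, no second sort, no empty-documents guard).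
import Mathlib
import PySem

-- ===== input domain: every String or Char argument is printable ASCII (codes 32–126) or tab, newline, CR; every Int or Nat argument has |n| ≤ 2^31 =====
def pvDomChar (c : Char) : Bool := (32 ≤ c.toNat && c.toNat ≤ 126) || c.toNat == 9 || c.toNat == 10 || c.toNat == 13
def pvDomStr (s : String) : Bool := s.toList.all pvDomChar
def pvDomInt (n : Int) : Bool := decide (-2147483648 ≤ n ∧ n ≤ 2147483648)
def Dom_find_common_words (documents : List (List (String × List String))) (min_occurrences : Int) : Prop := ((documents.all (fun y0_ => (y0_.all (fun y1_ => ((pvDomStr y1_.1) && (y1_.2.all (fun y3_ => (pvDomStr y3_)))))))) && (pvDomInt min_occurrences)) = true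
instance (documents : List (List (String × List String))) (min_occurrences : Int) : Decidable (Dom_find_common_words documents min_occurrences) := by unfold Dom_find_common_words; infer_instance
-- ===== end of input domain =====

-- B replaces Counter-based counting plus a final sort of the qualifying keys by one
-- sort of all tokens followed by a run-length scan emitting words already in order (alternative, same result).

-- ===== PORT A =====
def find_common_words (documents : List (List (String × List String))) (min_occurrences : Int) : List String :=
  if documents = [] then []
  else
    let all_tokens := documents.flatMap (fun doc => (PySem.Dict.mk doc).getD "tokens" [])
    let token_counts := PySem.Dict.counter all_tokens
    let common_words := (token_counts.items.filter (fun p => decide (min_occurrences ≤ p.2))).map (fun p => p.1)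
    PySem.List.sorted common_words (fun x => x) false

-- ===== PORT B =====
-- the run-length scan of Source B: the inner while loop is the takeWhile/dropWhile split
-- of the current run of tokens[i], the outer while loop is the recursion on the remainder
def groupRuns (m : Int) : List String → List String
  | [] => []
  | x :: rest =>
    let run := rest.takeWhile (fun y => y == x)
    let tail := rest.dropWhile (fun y => y == x)
    (if m ≤ (1 + run.length : Int) then [x] else []) ++ groupRuns m tail
termination_by l => l.length
decreasing_by exact Nat.lt_succ_of_le (List.length_dropWhile_le _ _)

def find_common_words_alt (documents : List (List (String × List String))) (min_occurrences : Int) : List String :=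
  groupRuns min_occurrences
    (PySem.List.sorted (documents.flatMap (fun doc => (PySem.Dict.mk doc).getD "tokens" [])) (fun x => x) false)

-- ===== PRECONDITION & SPEC =====
def Spec_find_common_words (documents : List (List (String × List String))) (min_occurrences : Int) (out : List String) : Prop := out = find_common_words_alt documents min_occurrences
instance (documents : List (List (String × List String))) (min_occurrences : Int) (out : List String) : Decidable (Spec_find_common_words documents min_occurrences out) := by unfold Spec_find_common_words; infer_instance

-- ===== CLAIM (what is proved, stated in full; the proofs are below) =====
def Claim_equal_find_common_words : Prop := ∀ (documents : List (List (String × List String))) (min_occurrences : Int), Dom_find_common_words documents min_occurrences → Spec_find_common_words documents min_occurrences (find_common_words documents min_occurrences)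

-- ===== LEMMAS AND PROOFS =====

-- the head of a dropWhile does not satisfy the predicate
lemma dropWhile_head_false {α : Type} (p : α → Bool) (l : List α) (y : α) (t : List α)
    (h : l.dropWhile p = y :: t) : p y = false := by
  induction l with
  | nil => simp at h
  | cons a l ih =>
    by_cases hp : p a
    · rw [List.dropWhile_cons_of_pos hp] at h; exact ih h
    · rw [List.dropWhile_cons_of_neg hp] at h
      cases h; simpa using hp

-- characterisation of the run-length scan on a (≤)-sorted list: its output is strictly
-- increasing and contains exactly the words occurring at least m times
lemma groupRuns_spec (m : Int) (s : List String) (hs : s.Pairwise (· ≤ ·)) :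
    (groupRuns m s).Pairwise (· < ·) ∧
      ∀ w, w ∈ groupRuns m s ↔ w ∈ s ∧ m ≤ (s.count w : Int) := by
  induction s using groupRuns.induct with
  | case1 => simp [groupRuns]
  | case2 x rest tail ih =>
    rw [List.pairwise_cons] at hs
    obtain ⟨hx, hrest⟩ := hs
    set run := rest.takeWhile (fun y => y == x) with hrun
    have htail : tail = rest.dropWhile (fun y => y == x) := rfl
    have hsplit : run ++ tail = rest := List.takeWhile_append_dropWhile
    have hruneq : ∀ y ∈ run, y = x := by
      intro y hy
      have := List.mem_takeWhile_imp hy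
      simpa using this
    have htailgt : ∀ y ∈ tail, x < y := by
      cases htl : tail with
      | nil => intro y hy; simp at hy
      | cons h0 t0 =>
        intro y hy
        have hh0 : (h0 == x) = false :=
          dropWhile_head_false _ rest h0 t0 (htail.symm.trans htl)
        have hh0ne : h0 ≠ x := by simpa using hh0
        have hh0mem : h0 ∈ rest := by rw [← hsplit, htl]; simp
        have hxh0 : x < h0 := lt_of_le_of_ne (hx h0 hh0mem) (Ne.symm hh0ne)
        rcases List.mem_cons.mp hy with rfl | hy'
        · exact hxh0
        · have : h0 ≤ y := by
            have htp : tail.Pairwise (· ≤ ·) :=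
              hrest.sublist (htail ▸ List.dropWhile_sublist _)
            rw [htl, List.pairwise_cons] at htp
            exact htp.1 y hy'
          exact lt_of_lt_of_le hxh0 this
    have htp : tail.Pairwise (· ≤ ·) := hrest.sublist (htail ▸ List.dropWhile_sublist _)
    obtain ⟨ihp, ihm⟩ := ih htp
    have hsubtail : ∀ w ∈ groupRuns m tail, w ∈ tail := fun w hw => ((ihm w).mp hw).1
    have hxnot : x ∉ tail := fun h => lt_irrefl x (htailgt x h)
    have hcount_x : (x :: rest).count x = 1 + run.length := by
      rw [← hsplit, List.count_cons_self, List.count_append]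
      have h1 : run.count x = run.length :=
        List.count_eq_length.mpr (fun y hy => ((hruneq y hy).symm : x = y))
      have h2 : tail.count x = 0 := List.count_eq_zero.mpr hxnot
      omega
    have hcount_ne : ∀ w, w ≠ x → (x :: rest).count w = tail.count w := by
      intro w hw
      rw [← hsplit, List.count_cons_of_ne hw.symm, List.count_append,
        List.count_eq_zero.mpr (fun h => hw (hruneq w h)), Nat.zero_add]
    have hgr : groupRuns m (x :: rest) =
        (if m ≤ (1 + run.length : Int) then [x] else []) ++ groupRuns m tail := by
      rw [groupRuns]
    constructor
    · rw [hgr]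
      split_ifs with hm
      · refine List.pairwise_cons.mpr ⟨?_, ihp⟩
        intro w hw; exact htailgt w (hsubtail w hw)
      · simpa using ihp
    · intro w
      rw [hgr]
      by_cases hwx : w = x
      · subst hwx
        have hnot : w ∉ groupRuns m tail := fun h => lt_irrefl w (htailgt w (hsubtail w h))
        split_ifs with hm
        · simp [hnot, hcount_x]
          omega
        · simp [hnot, hcount_x]
          omega
      · have hwrest : w ∈ rest ↔ w ∈ tail := by
          rw [← hsplit]
          simp only [List.mem_append, or_iff_right_iff_imp]
          intro hwr; exact absurd (hruneq w hwr) hwx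
        split_ifs with hm <;>
          simp [hwx, ihm w, List.mem_cons, hwrest, hcount_ne w hwx]

lemma find_common_words_eq_alt (documents : List (List (String × List String))) (m : Int) :
    find_common_words documents m = find_common_words_alt documents m := by
  by_cases hd : documents = []
  · subst hd
    show (if ([] : List (List (String × List String))) = [] then _ else _) = _
    rw [if_pos rfl]
    show ([] : List String) = groupRuns m (PySem.List.sorted [] _ false)
    rw [show PySem.List.sorted ([] : List String) (fun x => x) false = [] from rfl, groupRuns]
  · rw [find_common_words, if_neg hd, find_common_words_alt]
    set xs := documents.flatMap (fun doc => (PySem.Dict.mk doc).getD "tokens" []) with hxs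
    set s := PySem.List.sorted xs (fun x => x) false with hss
    have hs : s.Pairwise (· ≤ ·) := PySem.List.sorted_pairwise xs (fun x => x)
    obtain ⟨hp, hmem⟩ := groupRuns_spec m s hs
    set cw := (((PySem.Dict.counter xs).items.filter (fun p => decide (m ≤ p.2))).map (fun p => p.1)) with hcwdef
    have hcw : cw = (PySem.Set.ofList xs).filter (fun k => decide (m ≤ (xs.count k : Int))) := by
      rw [hcwdef, PySem.Dict.items_counter]
      simp [List.filter_map, Function.comp_def]
    have ndg : (groupRuns m s).Nodup := hp.imp (fun h => ne_of_lt h)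
    have ndc : cw.Nodup := by
      rw [hcw]; exact (PySem.Set.nodup_ofList xs).filter _
    have hperm : (groupRuns m s).Perm cw := by
      rw [List.perm_ext_iff_of_nodup ndg ndc]
      intro w
      rw [hmem w, hcw, List.mem_filter]
      have h1 : w ∈ s ↔ w ∈ xs := PySem.List.mem_sorted xs (fun x => x) false w
      have h2 : s.count w = xs.count w := (PySem.List.sorted_perm xs (fun x => x) false).count_eq w
      simp [h1, h2, PySem.Set.mem_ofList]
    exact PySem.List.sorted_eq_of_perm_of_pairwise_lt cw (groupRuns m s) (fun x => x) hperm hp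

-- ===== VERDICT (by name: the statement is the Claim_ definition above) =====
theorem find_common_words_spec : Claim_equal_find_common_words := by
  intro documents m _
  exact find_common_words_eq_alt documents m
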